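-- pv_equiv track=rewrite | github.com/Sliverwall/LLM_Roleplay | components/utils.py | extractInputFromTag
-- ===== SOURCE A (Python) =====
-- def extractInputFromTag(input_text: str, defaulTag: str):
--     startTag = "<"
--     endTag = ">"
--     input_list = list(input_text)
--     if startTag not in input_list  and endTag not in input_list:
--         tag = defaulTag
--         cleanInput = input_text
--     else:
--         tag = ""
--         cleanInput = ""
--         collectTag = False
--         collectInput = False
--         for char in input_text:
--             if collectInput:
--                 cleanInput += char
--             if char == endTag:
--                 collectTag = False
--                 collectInput = True
--             if collectTag:
--                 tag += char
--
--             if char == startTag: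
--                 collectTag = True
--     return tag, cleanInput
-- ===== SOURCE B (Python) =====
-- def extractInputFromTag(input_text: str, defaulTag: str):
--     if "<" not in input_text and ">" not in input_text:
--         return defaulTag, input_text
--     # clean input is simply everything after the first '>' ('' if there is none)
--     cleanInput = input_text.partition(">")[2]
--     # tag: a toggle scan; '>' closes, '<' opens (after appending), chars while open are collected
--     tag = ""
--     inside = False
--     for char in input_text:
--         if char == ">":
--             inside = False
--         else:
--             if inside:
--                 tag += char
--             if char == "<":
--                 inside = True
--     return tag, cleanInput
-- ===== Notes on version B (the rewrite author's own statement) =====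
-- stated objective: simpler
-- what changed: A's fused single loop with four pieces of state (two accumulators and two flags) is split into a closed-form str.partition slice for the clean input plus one dedicated toggle scan for the tag.
import Mathlib
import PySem

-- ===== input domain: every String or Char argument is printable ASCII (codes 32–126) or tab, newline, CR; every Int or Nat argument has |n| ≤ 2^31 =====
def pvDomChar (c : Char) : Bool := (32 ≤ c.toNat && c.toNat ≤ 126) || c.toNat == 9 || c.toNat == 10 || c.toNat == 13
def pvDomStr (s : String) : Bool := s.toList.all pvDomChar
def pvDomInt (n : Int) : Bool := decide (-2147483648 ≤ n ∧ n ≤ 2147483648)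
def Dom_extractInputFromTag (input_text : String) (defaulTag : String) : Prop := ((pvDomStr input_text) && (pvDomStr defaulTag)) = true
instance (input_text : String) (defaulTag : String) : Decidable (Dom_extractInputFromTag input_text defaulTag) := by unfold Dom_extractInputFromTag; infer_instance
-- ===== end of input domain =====

-- B splits A's fused four-state loop into a partition slice plus one dedicated toggle scan.

-- ===== PORT A =====
-- A's fused loop: state (tag, cleanInput, collectTag, collectInput), steps in A's exact order.
def pvALoop : List Char → List Char → List Char → Bool → Bool → List Char × List Char
  | [], tag, clean, _, _ => (tag, clean)
  | c :: cs, tag, clean, ct, ci =>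
    let clean := if ci then clean ++ [c] else clean
    let ct := if c = '>' then false else ct
    let ci := if c = '>' then true else ci
    let tag := if ct then tag ++ [c] else tag
    let ct := if c = '<' then true else ct
    pvALoop cs tag clean ct ci

def extractInputFromTag (input_text : String) (defaulTag : String) : String × String :=
  let input_list := input_text.toList
  if ¬ input_list.contains '<' ∧ ¬ input_list.contains '>' then
    (defaulTag, input_text)
  else
    let (tag, clean) := pvALoop input_list [] [] false false
    (String.ofList tag, String.ofList clean)

-- ===== PORT B =====
-- hand port of input_text.partition('>')[2] for the single-char separator '>': exact —
-- the third component of partition is everything after the first occurrence, [] if absent.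
def pvAfterGt : List Char → List Char
  | [] => []
  | c :: cs => if c = '>' then cs else pvAfterGt cs

-- B's toggle scan for the tag: '>' closes, '<' opens (after appending), chars while open collected.
def pvBTag : List Char → List Char → Bool → List Char
  | [], tag, _ => tag
  | c :: cs, tag, inside =>
    if c = '>' then pvBTag cs tag false
    else
      let tag := if inside then tag ++ [c] else tag
      pvBTag cs tag (if c = '<' then true else inside)

def extractInputFromTag_alt (input_text : String) (defaulTag : String) : String × String :=
  let cs := input_text.toList
  if ¬ cs.contains '<' ∧ ¬ cs.contains '>' then
    (defaulTag, input_text)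
  else
    (String.ofList (pvBTag cs [] false), String.ofList (pvAfterGt cs))

-- ===== PRECONDITION & SPEC =====
def Spec_extractInputFromTag (input_text : String) (defaulTag : String) (out : String × String) : Prop := out = extractInputFromTag_alt input_text defaulTag
instance (input_text : String) (defaulTag : String) (out : String × String) : Decidable (Spec_extractInputFromTag input_text defaulTag out) := by unfold Spec_extractInputFromTag; infer_instance

-- ===== CLAIM (what is proved, stated in full; the proofs are below) =====
def Claim_equal_extractInputFromTag : Prop := ∀ (input_text : String) (defaulTag : String), Dom_extractInputFromTag input_text defaulTag → Spec_extractInputFromTag input_text defaulTag (extractInputFromTag input_text defaulTag)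

-- ===== LEMMAS AND PROOFS =====

-- A's tag component coincides with B's toggle scan (ct ↔ inside, identical step).
theorem pvALoop_fst (cs : List Char) : ∀ (tag clean : List Char) (ct ci : Bool),
    (pvALoop cs tag clean ct ci).1 = pvBTag cs tag ct := by
  induction cs with
  | nil => intro tag clean ct ci; rfl
  | cons c cs ih =>
    intro tag clean ct ci
    by_cases h : c = '>'
    · simp [pvALoop, pvBTag, h, ih]
    · by_cases h2 : c = '<' <;> simp [pvALoop, pvBTag, h, h2, ih]

-- Once collectInput is on it stays on: the clean accumulator just collects the rest.
theorem pvALoop_snd_on (cs : List Char) : ∀ (tag clean : List Char) (ct : Bool),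
    (pvALoop cs tag clean ct true).2 = clean ++ cs := by
  induction cs with
  | nil => intro tag clean ct; simp [pvALoop]
  | cons c cs ih =>
    intro tag clean ct
    by_cases h : c = '>' <;> simp [pvALoop, h, ih]

-- With collectInput off, the clean accumulator ends up as everything after the first '>'.
theorem pvALoop_snd_off (cs : List Char) : ∀ (tag clean : List Char) (ct : Bool),
    (pvALoop cs tag clean ct false).2 = clean ++ pvAfterGt cs := by
  induction cs with
  | nil => intro tag clean ct; simp [pvALoop, pvAfterGt]
  | cons c cs ih =>
    intro tag clean ct
    by_cases h : c = '>'
    · simp [pvALoop, pvAfterGt, h, pvALoop_snd_on]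
    · simp [pvALoop, pvAfterGt, h, ih]

-- ===== VERDICT (by name: the statement is the Claim_ definition above) =====
theorem extractInputFromTag_spec : Claim_equal_extractInputFromTag := by
  intro input_text defaulTag _
  unfold Spec_extractInputFromTag extractInputFromTag extractInputFromTag_alt
  simp only []
  split_ifs with h
  · rfl
  · rw [show pvALoop input_text.toList [] [] false false
        = ((pvALoop input_text.toList [] [] false false).1,
           (pvALoop input_text.toList [] [] false false).2) from rfl]
    rw [pvALoop_fst, pvALoop_snd_off]
    simp
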